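-- pv_equiv track=rewrite | github.com/4um3n/SoftUni-Courses | Python/Advanced/OOP/0.1-First-Steps-In-OOP/Lab/rhombus_of_stars.py | create_rhombus
-- ===== SOURCE A (Python) =====
-- def create_rhombus(rows, symbol='*'):
--     def draw_line():
--         line = ' ' * (rows - r - 1)
--         line += ' '.join([f"{symbol}" for _ in range(r + 1)])
--         return line
--
--     lines = []
--     for r in range(rows):
--         lines.append(draw_line())
--
--     for r in range(rows - 2, -1, -1):
--         lines.append(draw_line())
--
--     return '\n'.join(lines)
-- ===== SOURCE B (Python) =====
-- def create_rhombus(rows, symbol='*'):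
--     if rows <= 0:
--         return ''
--     line = ' ' * (rows - 1) + f"{symbol}"
--     top = [line]
--     for _ in range(rows - 1):
--         line = line[1:] + ' ' + f"{symbol}"
--         top.append(line)
--     return '\n'.join(top + top[-2::-1])
-- ===== Notes on version B (the rewrite author's own statement) =====
-- stated objective: alternative
-- what changed: Instead of recomputing every line from its row index with two directional loops and a closure, B builds only the top half incrementally -- each line is derived from the previous one by dropping one leading space and appending ' '+symbol -- and obtains the bottom half by mirroring the list with top[-2::-1].
import Mathlib
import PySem

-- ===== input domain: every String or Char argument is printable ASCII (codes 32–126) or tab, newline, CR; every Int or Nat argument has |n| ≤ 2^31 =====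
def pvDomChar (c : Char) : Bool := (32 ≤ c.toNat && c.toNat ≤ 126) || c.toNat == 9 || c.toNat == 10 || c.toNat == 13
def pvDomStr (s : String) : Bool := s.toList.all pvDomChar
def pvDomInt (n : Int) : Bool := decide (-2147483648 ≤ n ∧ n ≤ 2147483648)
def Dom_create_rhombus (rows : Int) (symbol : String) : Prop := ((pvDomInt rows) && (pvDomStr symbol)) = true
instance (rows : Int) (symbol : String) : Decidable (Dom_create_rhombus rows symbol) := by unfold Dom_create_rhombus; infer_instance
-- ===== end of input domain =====

-- B builds only the top half, deriving each line from the previous one by a string edit, and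
-- mirrors the list for the bottom half, instead of A's per-row recomputation in two directional
-- loops (objective: alternative).

-- ===== PORT A =====
-- draw_line closure: r and rows captured; ' ' * (rows - r - 1) is a replicate (negative counts clamp to 0, as in Python)
def pvDrawLine (rows : Int) (symbol : String) (r : Int) : String :=
  String.ofList (List.replicate (rows - r - 1).toNat ' ') ++
    PySem.Str.join " " ((PySem.List.pyRange 0 (r + 1) 1).map (fun _ => symbol))

def create_rhombus (rows : Int) (symbol : String) : String :=
  let lines : List String :=
    (PySem.List.pyRange 0 rows 1).foldl (fun acc r => acc ++ [pvDrawLine rows symbol r]) []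
  let lines :=
    (PySem.List.pyRange (rows - 2) (-1) (-1)).foldl (fun acc r => acc ++ [pvDrawLine rows symbol r]) lines
  PySem.Str.join "\n" lines

-- ===== PORT B =====
def create_rhombus_alt (rows : Int) (symbol : String) : String :=
  if rows ≤ 0 then "" else
  let line0 : String := String.ofList (List.replicate (rows - 1).toNat ' ') ++ symbol
  let st : String × List String :=
    (PySem.List.pyRange 0 (rows - 1) 1).foldl
      (fun st _ =>
        let line := PySem.Str.slice st.1 (some 1) none ++ " " ++ symbol
        (line, st.2 ++ [line]))
      (line0, [line0])
  -- top + top[-2::-1]; a list slice never raises, so getD's default is unreachable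
  PySem.Str.join "\n" (st.2 ++ (PySem.List.slice? st.2 (some (-2)) none (-1)).getD [])

-- ===== PRECONDITION & SPEC =====
def Spec_create_rhombus (rows : Int) (symbol : String) (out : String) : Prop := out = create_rhombus_alt rows symbol
instance (rows : Int) (symbol : String) (out : String) : Decidable (Spec_create_rhombus rows symbol out) := by unfold Spec_create_rhombus; infer_instance

-- ===== CLAIM (what is proved, stated in full; the proofs are below) =====
def Claim_equal_create_rhombus : Prop := ∀ (rows : Int) (symbol : String), Dom_create_rhombus rows symbol → Spec_create_rhombus rows symbol (create_rhombus rows symbol)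

-- ===== LEMMAS AND PROOFS =====

-- xs[-2::-1] is reverse(xs[:-1])
theorem pv_slice_m2 {α : Type} (xs : List α) :
    PySem.List.slice? xs (some (-2)) none (-1) = some xs.dropLast.reverse := by
  simp only [PySem.List.slice?, PySem.List.sliceIndices]
  norm_num
  by_cases h : 1 < xs.length
  · rw [if_pos h]
    have hmax : max (-2 + (xs.length:Int)) (-1) = (xs.length:Int) - 2 := by omega
    rw [hmax]
    have hc : ((xs.length:Int) - 2 + 1).toNat = xs.length - 1 := by omega
    rw [hc]
    have hmap : List.filterMap (fun (x : Nat) => xs[((xs.length:Int) - 2 + -(x:Int)).toNat]?)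
        (List.range (xs.length - 1))
        = (List.range (xs.length - 1)).map (fun k => xs[xs.length - 2 - k]'(by omega)) := by
      apply List.filterMap_eq_map_iff_forall_eq_some.mpr
      intro k hk
      rw [List.mem_range] at hk
      have ht : ((xs.length:Int) - 2 + -(k:Int)).toNat = xs.length - 2 - k := by omega
      rw [ht]
      simp
    rw [hmap]
    apply List.ext_getElem
    · simp
    · intro i h1 h2
      simp only [List.getElem_map, List.getElem_range, List.getElem_reverse,
        List.getElem_dropLast]
      congr 1
      simp at h1 h2 ⊢
      omega
  · rw [if_neg h]
    have hd : xs.dropLast = [] := by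
      cases xs with
      | nil => rfl
      | cons a t => cases t with
        | nil => rfl
        | cons b u => simp at h
    simp [hd]
-- canonical line, at the character level: ind spaces then cnt symbols joined with ' '
def pvLineC (cs : List Char) (ind cnt : Nat) : List Char :=
  List.replicate ind ' ' ++ PySem.Chars.join [' '] (List.replicate cnt cs)

def pvLineR (rows' : Nat) (symbol : String) (r : Nat) : String :=
  String.ofList (pvLineC symbol.toList (rows' - r - 1) (r + 1))

-- A's draw_line(r) is the canonical line of row r
theorem pvDrawLine_eq (rows : Int) (symbol : String) (k : Nat) (hk : (k:Int) < rows) :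
    pvDrawLine rows symbol (k:Int) = pvLineR rows.toNat symbol k := by
  apply String.toList_inj.mp
  unfold pvDrawLine pvLineR pvLineC
  rw [PySem.List.pyRange_one]
  simp only [String.toList_append, String.toList_ofList, PySem.Str.join,
    List.map_const', List.length_map, List.length_range]
  have h1 : (rows - (k:Int) - 1).toNat = rows.toNat - k - 1 := by omega
  have h2 : ((k:Int) + 1 - 0).toNat = k + 1 := by omega
  rw [h1, h2, List.map_replicate, show " ".toList = [' '] from rfl]

-- sep.join(l + [x]) = sep.join(l) + sep + x for nonempty l
theorem pv_join_append (sep x : List Char) (l : List (List Char)) (hl : l ≠ []) :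
    PySem.Chars.join sep (l ++ [x]) = PySem.Chars.join sep l ++ sep ++ x := by
  induction l with
  | nil => exact absurd rfl hl
  | cons a t ih =>
    cases t with
    | nil =>
      rw [List.cons_append, List.nil_append, PySem.Chars.join_cons_cons,
        PySem.Chars.join_singleton, PySem.Chars.join_singleton]
    | cons b u =>
      simp only [List.cons_append]
      rw [PySem.Chars.join_cons_cons,
        show b :: (u ++ [x]) = (b :: u) ++ [x] from rfl, ih (by simp),
        PySem.Chars.join_cons_cons]
      simp

-- B's string edit turns line r into line r+1
theorem pv_step (rows' : Nat) (symbol : String) (r : Nat) (h : r + 1 ≤ rows' - 1) :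
    PySem.Str.slice (pvLineR rows' symbol r) (some 1) none ++ " " ++ symbol
      = pvLineR rows' symbol (r + 1) := by
  apply String.toList_inj.mp
  simp only [String.toList_append, PySem.Str.toList_slice]
  rw [PySem.Chars.slice_eq_listSlice, PySem.List.slice_from_one]
  unfold pvLineR pvLineC
  simp only [String.toList_ofList]
  have hind : rows' - r - 1 = (rows' - (r+1) - 1) + 1 := by omega
  rw [hind, List.replicate_succ, List.cons_append, List.tail_cons]
  have hsp : " ".toList = [' '] := rfl
  rw [hsp]
  have hrep : List.replicate (r + 1 + 1) symbol.toList
      = List.replicate (r + 1) symbol.toList ++ [symbol.toList] := by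
    rw [← List.replicate_succ']
  rw [hrep, pv_join_append [' '] symbol.toList _ (by simp)]
  simp

-- B's fold invariant: after m iterations the state is (line m, lines 0..m)
theorem pv_fold_inv (rows' : Nat) (symbol : String) (m : Nat) (hm : m ≤ rows' - 1) :
    (PySem.List.pyRange 0 (m:Int) 1).foldl
      (fun (st : String × List String) _ =>
        let line := PySem.Str.slice st.1 (some 1) none ++ " " ++ symbol
        (line, st.2 ++ [line]))
      (pvLineR rows' symbol 0, [pvLineR rows' symbol 0])
    = (pvLineR rows' symbol m, (List.range (m+1)).map (pvLineR rows' symbol)) := by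
  induction m with
  | zero =>
    rw [PySem.List.pyRange_one_eq_nil (by omega)]
    simp
  | succ k ih =>
    have hk : k ≤ rows' - 1 := by omega
    rw [show ((k + 1 : Nat) : Int) = (k:Int) + 1 from by push_cast; ring,
      PySem.List.pyRange_one_succ_right (by positivity), List.foldl_append, ih hk]
    simp only [List.foldl_cons, List.foldl_nil]
    rw [pv_step rows' symbol k hm]
    rw [List.range_succ (n := k + 1), List.map_append]
    simp

-- ===== VERDICT (by name: the statement is the Claim_ definition above) =====
theorem create_rhombus_spec : Claim_equal_create_rhombus := by
  intro rows symbol _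
  unfold Spec_create_rhombus create_rhombus create_rhombus_alt
  by_cases hpos : rows ≤ 0
  · rw [if_pos hpos]
    rw [PySem.List.pyRange_one_eq_nil (by omega), PySem.List.pyRange_neg_one_eq_nil (by omega)]
    rfl
  · rw [if_neg hpos]
    rw [not_le] at hpos
    simp only
    set rows' := rows.toNat with hr
    have hr1 : 1 ≤ rows' := by omega
    -- B's line0 is line 0
    have hline0 : String.ofList (List.replicate (rows - 1).toNat ' ') ++ symbol
        = pvLineR rows' symbol 0 := by
      apply String.toList_inj.mp
      unfold pvLineR pvLineC
      simp only [String.toList_append, String.toList_ofList]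
      rw [show (0:Nat) + 1 = 1 from rfl, List.replicate_one, PySem.Chars.join_singleton,
        show (rows - 1).toNat = rows' - 0 - 1 by omega]
    rw [hline0]
    have hrm1 : rows - 1 = ((rows' - 1 : Nat) : Int) := by omega
    rw [hrm1, pv_fold_inv rows' symbol (rows' - 1) (le_refl _)]
    simp only
    rw [pv_slice_m2, Option.getD_some]
    have hmm : (rows' - 1) + 1 = rows' := by omega
    rw [hmm]
    -- both sides are joins of the same list of lines
    congr 1
    -- A's list of lines
    rw [PySem.List.foldl_append_singleton_eq_map, PySem.List.foldl_append_singleton_eq_map]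
    simp only [List.nil_append]
    have hasc : (PySem.List.pyRange 0 rows 1).map (pvDrawLine rows symbol)
        = (List.range rows').map (pvLineR rows' symbol) := by
      rw [PySem.List.pyRange_one]
      simp only [List.map_map, sub_zero, hr]
      apply List.map_congr_left
      intro k hk
      rw [List.mem_range] at hk
      simp only [Function.comp_apply, zero_add]
      exact pvDrawLine_eq rows symbol k (by omega)
    have hdesc : PySem.List.pyRange (rows - 2) (-1) (-1)
        = (PySem.List.pyRange 0 (rows - 1) 1).reverse := by
      rw [PySem.List.pyRange_neg_one_eq_reverse, show ((-1:Int) + 1) = 0 from by ring,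
        show rows - 2 + 1 = rows - 1 from by ring]
    have hasc1 : (PySem.List.pyRange 0 (rows - 1) 1).map (pvDrawLine rows symbol)
        = (List.range (rows' - 1)).map (pvLineR rows' symbol) := by
      rw [PySem.List.pyRange_one]
      simp only [List.map_map, sub_zero]
      rw [show (rows - 1).toNat = rows' - 1 from by omega]
      apply List.map_congr_left
      intro k hk
      rw [List.mem_range] at hk
      simp only [Function.comp_apply, zero_add]
      exact pvDrawLine_eq rows symbol k (by omega)
    have hdl : (List.map (pvLineR rows' symbol) (List.range rows')).dropLast
        = List.map (pvLineR rows' symbol) (List.range (rows' - 1)) := by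
      rw [show List.range rows' = List.range ((rows' - 1) + 1) from by rw [hmm],
        List.range_succ, List.map_append, List.map_singleton, List.dropLast_concat]
    rw [hdesc, List.map_reverse, hasc, hasc1, hdl]
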